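-- pv_equiv track=rewrite | github.com/maximyuss/Yandex | training-6.0/6-2g.py | task_6_2_g
-- ===== SOURCE A (Python) =====
-- def task_6_2_g(n, c, s):
--     cnt_mark = cnt_a = cnt_b = res = r = 0
--     for l in range(n):
--         while r < n:
--             if s[r] == 'a':
--                 cnt_a += 1
--             elif s[r] == 'b':
--                 if cnt_mark + cnt_a <= c:
--                     cnt_b += 1
--                     cnt_mark += cnt_a
--                 else:
--                     break
--             r += 1
--         res = max(res, r - l)
--         if s[l] == 'a':
--             cnt_a -= 1
--             cnt_mark -= cnt_b
--         elif s[l] == 'b':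
--             cnt_b -= 1
--     return res
-- ===== SOURCE B (Python) =====
-- def task_6_2_g(n, c, s):
--     # prefix tables: prefA[k] = #'a' in s[:k], cntB[k] = #'b' in s[:k],
--     # Sb[k] = sum of prefA[j] over b-positions j < k
--     prefA = [0] * (n + 1)
--     cntB = [0] * (n + 1)
--     Sb = [0] * (n + 1)
--     for i in range(n):
--         ch = s[i]
--         prefA[i + 1] = prefA[i] + (1 if ch == 'a' else 0)
--         cntB[i + 1] = cntB[i] + (1 if ch == 'b' else 0)
--         Sb[i + 1] = Sb[i] + (prefA[i] if ch == 'b' else 0)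
--
--     def pairs(l, r):
--         return Sb[r] - Sb[l] - prefA[l] * (cntB[r] - cntB[l])
--
--     res = 0
--     for l in range(n):
--         lo, hi = l, n
--         while lo < hi:
--             mid = (lo + hi + 1) // 2
--             if pairs(l, mid) <= c:
--                 lo = mid
--             else:
--                 hi = mid - 1
--         res = max(res, lo - l)
--     return res
-- ===== Notes on version B (the rewrite author's own statement) =====
-- stated objective: alternative
-- what changed: replaces the amortized incremental sliding window with precomputed prefix tables (prefA, cntB, Sb) and, for each left end, a binary search for the largest feasible right end using the closed-form pair count Sb[r]-Sb[l]-prefA[l]*(cntB[r]-cntB[l])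
-- intended difference: For c < 0 with n >= 1 and s[0] != 'b', A's right pointer sticks at the first 'b' and A returns its index (leftover loop state, e.g. 1 on the witness (1,-1,'a')) while B returns 0, the correct maximum length of a window with pair count <= c (no window qualifies when c < 0); when s[0] == 'b' or n < 1 both return 0 (proved exact by task_6_2_g_tight). — e.g. on task_6_2_g(1, -1, "a"): A returns 1, B returns 0
import Mathlib
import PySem

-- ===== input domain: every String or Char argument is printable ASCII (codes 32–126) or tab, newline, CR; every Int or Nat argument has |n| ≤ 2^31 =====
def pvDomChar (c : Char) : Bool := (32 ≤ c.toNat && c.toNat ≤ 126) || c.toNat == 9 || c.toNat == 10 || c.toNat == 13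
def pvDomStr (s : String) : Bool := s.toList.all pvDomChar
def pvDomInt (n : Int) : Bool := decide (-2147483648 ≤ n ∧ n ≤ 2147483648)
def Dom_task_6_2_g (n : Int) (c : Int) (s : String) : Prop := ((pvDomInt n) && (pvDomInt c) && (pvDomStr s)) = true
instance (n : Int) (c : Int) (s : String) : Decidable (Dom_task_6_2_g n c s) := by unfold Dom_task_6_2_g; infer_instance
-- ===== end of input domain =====

-- B replaces A's amortized sliding window by prefix tables + per-left-end binary search
-- (alternative decomposition, not claimed faster); for c < 0 B intentionally differs (see D_).


-- ===== PORT A =====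
-- s[i] (only evaluated at in-range indices under Pre_); '?' default is never reached there
def pvChar (s : String) (i : Int) : Char := (PySem.Str.pyGet? s i).getD '?'

-- the inner 'while r < n' loop; fuel = (n - r).toNat at the call site makes it total
def pvAWhile (s : String) (n c : Int) : Nat → Int → Int → Int → Int → (Int × Int × Int × Int)
  | 0, mark, a, b, r => (mark, a, b, r)
  | fuel+1, mark, a, b, r =>
    if r < n then
      if pvChar s r = 'a' then pvAWhile s n c fuel mark (a+1) b (r+1)
      else if pvChar s r = 'b' then
        if mark + a ≤ c then pvAWhile s n c fuel (mark + a) a (b + 1) (r + 1)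
        else (mark, a, b, r)
      else pvAWhile s n c fuel mark a b (r + 1)
    else (mark, a, b, r)

-- the outer 'for l in range(n)' loop; fuel = number of remaining iterations
def pvAFor (s : String) (n c : Int) : Nat → Int → Int → Int → Int → Int → Int → Int
  | 0, _mark, _a, _b, res, _r, _l => res
  | fuel+1, mark, a, b, res, r, l =>
    let st := pvAWhile s n c (n - r).toNat mark a b r
    let res' := max res (st.2.2.2 - l)
    if pvChar s l = 'a' then
      pvAFor s n c fuel (st.1 - st.2.2.1) (st.2.1 - 1) st.2.2.1 res' st.2.2.2 (l+1)
    else if pvChar s l = 'b' then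
      pvAFor s n c fuel st.1 st.2.1 (st.2.2.1 - 1) res' st.2.2.2 (l+1)
    else
      pvAFor s n c fuel st.1 st.2.1 st.2.2.1 res' st.2.2.2 (l+1)

def task_6_2_g (n : Int) (c : Int) (s : String) : Int :=
  pvAFor s n c n.toNat 0 0 0 0 0 0

-- ===== PORT B =====
-- s[i] for Source B (only evaluated at in-range indices under Pre_)
def pvCharB (s : String) (i : Int) : Char := (PySem.Str.pyGet? s i).getD '?'

-- arr[i] for the prefix tables (always in range where used)
def pvGetI (xs : List Int) (i : Int) : Int := (PySem.List.pyGet? xs i).getD 0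

-- build prefA, cntB, Sb (prefA[k] = #'a' in s[:k], cntB[k] = #'b' in s[:k],
-- Sb[k] = sum of prefA[j] over b-positions j < k); fuel = n - i remaining iterations
def pvBuild (s : String) : Nat → Int → (List Int × List Int × List Int) → (List Int × List Int × List Int)
  | 0, _i, arrs => arrs
  | fuel+1, i, (pA, pB, sB) =>
    let ch := pvCharB s i
    let a := pvGetI pA i
    let b := pvGetI pB i
    let sb := pvGetI sB i
    pvBuild s fuel (i+1)
      (pA ++ [a + (if ch = 'a' then 1 else 0)],
       pB ++ [b + (if ch = 'b' then 1 else 0)],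
       sB ++ [sb + (if ch = 'b' then a else 0)])

-- pairs(l, r) of Source B: closed-form pair count of window [l, r)
def pvPairs (pA pB sB : List Int) (l r : Int) : Int :=
  pvGetI sB r - pvGetI sB l - pvGetI pA l * (pvGetI pB r - pvGetI pB l)

-- the 'while lo < hi' binary search; fuel = (hi - lo).toNat at the call site
def pvBSearch (pA pB sB : List Int) (c l : Int) : Nat → Int → Int → Int
  | 0, lo, _hi => lo
  | fuel+1, lo, hi =>
    if lo < hi then
      let mid := PySem.Int.floordiv (lo + hi + 1) 2
      if pvPairs pA pB sB l mid ≤ c then pvBSearch pA pB sB c l fuel mid hi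
      else pvBSearch pA pB sB c l fuel lo (mid - 1)
    else lo

-- the 'for l in range(n)' loop of Source B
def pvBFor (pA pB sB : List Int) (n c : Int) : Nat → Int → Int → Int
  | 0, _l, res => res
  | fuel+1, l, res =>
    let lo := pvBSearch pA pB sB c l (n - l).toNat l n
    pvBFor pA pB sB n c fuel (l+1) (max res (lo - l))

def task_6_2_g_alt (n : Int) (c : Int) (s : String) : Int :=
  let arrs := pvBuild s n.toNat 0 ([0], [0], [0])
  pvBFor arrs.1 arrs.2.1 arrs.2.2 n c n.toNat 0 0

-- ===== PRECONDITION & SPEC =====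
-- Pre_ excludes exactly n > len(s), on which A (and B) raise IndexError.
def Pre_task_6_2_g (n : Int) (c : Int) (s : String) : Prop := n ≤ (s.toList.length : Int)
instance (n : Int) (c : Int) (s : String) : Decidable (Pre_task_6_2_g n c s) := by
  unfold Pre_task_6_2_g; infer_instance

def pvWitness_task_6_2_g : Int × Int × String := (4, 1, "abab")

-- For c < 0 (with n ≥ 1 and s not starting with 'b') A's right pointer sticks at the first
-- 'b' and A returns that index — leftover loop state (e.g. 1 on (1,-1,"a")); B returns 0, the correct
-- maximum length of a window whose pair count is ≤ c (no window qualifies when c < 0).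
def D_task_6_2_g (n : Int) (c : Int) (s : String) : Prop :=
  c < 0 ∧ 1 ≤ n ∧ s.toList.head? ≠ some 'b'
instance (n : Int) (c : Int) (s : String) : Decidable (D_task_6_2_g n c s) := by
  unfold D_task_6_2_g; infer_instance

def Spec_task_6_2_g (n : Int) (c : Int) (s : String) (out : Int) : Prop :=
  ¬ D_task_6_2_g n c s → out = task_6_2_g_alt n c s
instance (n : Int) (c : Int) (s : String) (out : Int) : Decidable (Spec_task_6_2_g n c s out) := by
  unfold Spec_task_6_2_g; infer_instance

def pvDiffWitness_task_6_2_g : Int × Int × String := (1, -1, "a")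
def pvDiffWitnessOut_task_6_2_g : Int × Int := (1, 0)

-- ===== CLAIM (what is proved, stated in full; the proofs are below) =====
def Claim_unchanged_task_6_2_g : Prop := ∀ (n : Int) (c : Int) (s : String), Dom_task_6_2_g n c s → Pre_task_6_2_g n c s → Spec_task_6_2_g n c s (task_6_2_g n c s)
def Claim_exact_task_6_2_g : Prop := ∀ (n : Int) (c : Int) (s : String), Dom_task_6_2_g n c s → Pre_task_6_2_g n c s → D_task_6_2_g n c s → task_6_2_g n c s ≠ task_6_2_g_alt n c s
def Claim_changed_task_6_2_g : Prop := Dom_task_6_2_g (pvDiffWitness_task_6_2_g.1) (pvDiffWitness_task_6_2_g.2.1) (pvDiffWitness_task_6_2_g.2.2) ∧ Pre_task_6_2_g (pvDiffWitness_task_6_2_g.1) (pvDiffWitness_task_6_2_g.2.1) (pvDiffWitness_task_6_2_g.2.2) ∧ D_task_6_2_g (pvDiffWitness_task_6_2_g.1) (pvDiffWitness_task_6_2_g.2.1) (pvDiffWitness_task_6_2_g.2.2) ∧ task_6_2_g (pvDiffWitness_task_6_2_g.1) (pvDiffWitness_task_6_2_g.2.1) (pvDiffWitness_task_6_2_g.2.2)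 = pvDiffWitnessOut_task_6_2_g.1 ∧ task_6_2_g_alt (pvDiffWitness_task_6_2_g.1) (pvDiffWitness_task_6_2_g.2.1) (pvDiffWitness_task_6_2_g.2.2) = pvDiffWitnessOut_task_6_2_g.2 ∧ pvDiffWitnessOut_task_6_2_g.1 ≠ pvDiffWitnessOut_task_6_2_g.2

-- ===== LEMMAS AND PROOFS =====

-- specification-side functions, over t = s.toList and Nat indices
def pvCh (t : List Char) (k : Nat) : Char := (t[k]?).getD ' '
def pvPa (t : List Char) : Nat → Int
  | 0 => 0
  | k+1 => pvPa t k + (if pvCh t k = 'a' then 1 else 0)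
def pvPb (t : List Char) : Nat → Int
  | 0 => 0
  | k+1 => pvPb t k + (if pvCh t k = 'b' then 1 else 0)
def pvSb (t : List Char) : Nat → Int
  | 0 => 0
  | k+1 => pvSb t k + (if pvCh t k = 'b' then pvPa t k else 0)
-- pair count of the window [l, r)
def pvPairsF (t : List Char) (l r : Nat) : Int :=
  pvSb t r - pvSb t l - pvPa t l * (pvPb t r - pvPb t l)
-- largest r in [l, N] with pvPairsF t l r ≤ c (given 0 ≤ c, l ≤ N)
def pvR (t : List Char) (c : Int) (N l : Nat) : Nat :=
  Nat.findGreatest (fun r => l ≤ r ∧ pvPairsF t l r ≤ c) N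
-- the common fold both loops compute: res ← max res (R l - l), l = 0 .. N-1
def pvF (t : List Char) (c : Int) (N : Nat) : Nat → Nat → Int → Int
  | 0, _l, res => res
  | fuel+1, l, res => pvF t c N fuel (l+1) (max res ((pvR t c N l : Int) - (l : Int)))

theorem pvChar_eq (s : String) (k : Nat) (h : k < s.toList.length) :
    pvChar s (k : Int) = pvCh s.toList k := by
  simp [pvChar, pvCh, List.getElem?_eq_getElem h]

theorem pvCharB_eq (s : String) (k : Nat) (h : k < s.toList.length) :
    pvCharB s (k : Int) = pvCh s.toList k := by
  simp [pvCharB, pvCh, List.getElem?_eq_getElem h]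

theorem pvPa_mono (t : List Char) {l r : Nat} (h : l ≤ r) : pvPa t l ≤ pvPa t r := by
  induction r, h using Nat.le_induction with
  | base => exact le_refl _
  | succ k hk ih => simp only [pvPa]; split <;> omega

theorem pvPb_mono (t : List Char) {l r : Nat} (h : l ≤ r) : pvPb t l ≤ pvPb t r := by
  induction r, h using Nat.le_induction with
  | base => exact le_refl _
  | succ k hk ih => simp only [pvPb]; split <;> omega

theorem pvPairsF_self (t : List Char) (l : Nat) : pvPairsF t l l = 0 := by
  simp [pvPairsF]

theorem pvPairsF_succ_r (t : List Char) (l r : Nat) :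
    pvPairsF t l (r+1) = pvPairsF t l r + (if pvCh t r = 'b' then pvPa t r - pvPa t l else 0) := by
  simp only [pvPairsF, pvSb, pvPb]
  split <;> ring

theorem pvPairsF_mono_r (t : List Char) {l r r' : Nat} (hlr : l ≤ r) (h : r ≤ r') :
    pvPairsF t l r ≤ pvPairsF t l r' := by
  induction r', h using Nat.le_induction with
  | base => exact le_refl _
  | succ k hk ih =>
    have hpa := pvPa_mono t (le_trans hlr hk)
    rw [pvPairsF_succ_r]
    split <;> omega

theorem pvPairsF_succ_l_a (t : List Char) (l r : Nat) (h : pvCh t l = 'a') :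
    pvPairsF t (l+1) r = pvPairsF t l r - (pvPb t r - pvPb t l) := by
  simp [pvPairsF, pvPa, pvPb, pvSb, h]
  ring

theorem pvPairsF_succ_l_b (t : List Char) (l r : Nat) (h : pvCh t l = 'b') :
    pvPairsF t (l+1) r = pvPairsF t l r := by
  simp [pvPairsF, pvPa, pvPb, pvSb, h]
  ring

theorem pvPairsF_succ_l_o (t : List Char) (l r : Nat) (ha : pvCh t l ≠ 'a') (hb : pvCh t l ≠ 'b') :
    pvPairsF t (l+1) r = pvPairsF t l r := by
  simp [pvPairsF, pvPa, pvPb, pvSb, ha, hb]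

theorem pvR_le (t : List Char) (c : Int) (N l : Nat) : pvR t c N l ≤ N :=
  Nat.findGreatest_le N

theorem pvR_ge (t : List Char) {c : Int} (hc : 0 ≤ c) {N l : Nat} (hl : l ≤ N) :
    l ≤ pvR t c N l :=
  Nat.le_findGreatest (P := fun r => l ≤ r ∧ pvPairsF t l r ≤ c) hl
    ⟨le_rfl, by rw [pvPairsF_self]; exact hc⟩

theorem pvR_max (t : List Char) {c : Int} {N l r : Nat} (hlr : l ≤ r) (hr : r ≤ N)
    (h : pvPairsF t l r ≤ c) : r ≤ pvR t c N l :=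
  Nat.le_findGreatest (P := fun r => l ≤ r ∧ pvPairsF t l r ≤ c) hr ⟨hlr, h⟩

theorem pvR_pairs (t : List Char) {c : Int} (hc : 0 ≤ c) {N l : Nat} (hl : l ≤ N) :
    pvPairsF t l (pvR t c N l) ≤ c := by
  exact (Nat.findGreatest_spec (P := fun r => l ≤ r ∧ pvPairsF t l r ≤ c) hl
    ⟨le_rfl, by rw [pvPairsF_self]; exact hc⟩).2

theorem pvR_ge_succ (t : List Char) {c : Int} (hc : 0 ≤ c) {N l : Nat} (hl : l < N) :
    l + 1 ≤ pvR t c N l := by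
  apply pvR_max t (Nat.le_succ l) hl
  rw [pvPairsF_succ_r, pvPairsF_self]
  split <;> omega

theorem pvQ_iff (t : List Char) {c : Int} (hc : 0 ≤ c) {N l r : Nat} (hl : l ≤ N)
    (hlr : l ≤ r) (hr : r ≤ N) : pvPairsF t l r ≤ c ↔ r ≤ pvR t c N l := by
  constructor
  · exact fun h => pvR_max t hlr hr h
  · intro h
    exact le_trans (pvPairsF_mono_r t hlr h) (pvR_pairs t hc hl)

-- ===== A-side =====

theorem pvAWhile_spec (s : String) (c : Int) (N : Nat) (hlen : N ≤ s.toList.length)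
    (hc : 0 ≤ c) (l : Nat) (hl : l ≤ N) :
    ∀ (fuel : Nat) (r : Nat), N - r ≤ fuel → l ≤ r → r ≤ N →
      pvPairsF s.toList l r ≤ c →
      pvAWhile s (N : Int) c fuel (pvPairsF s.toList l r)
        (pvPa s.toList r - pvPa s.toList l) (pvPb s.toList r - pvPb s.toList l) (r : Int)
      = (pvPairsF s.toList l (pvR s.toList c N l),
         pvPa s.toList (pvR s.toList c N l) - pvPa s.toList l,
         pvPb s.toList (pvR s.toList c N l) - pvPb s.toList l,
         ((pvR s.toList c N l : Nat) : Int)) := by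
  intro fuel
  induction fuel with
  | zero =>
    intro r hfuel hlr hrN hQ
    have hrN' : r = N := by omega
    have hR : pvR s.toList c N l = r := by
      have h1 := pvR_max s.toList hlr hrN hQ
      have h2 := pvR_le s.toList c N l
      omega
    rw [hR, pvAWhile]
  | succ fuel ih =>
    intro r hfuel hlr hrN hQ
    rw [pvAWhile]
    by_cases hrn : (r : Int) < (N : Int)
    · rw [if_pos hrn]
      have hrN2 : r < N := by exact_mod_cast hrn
      have hch : pvChar s (r : Int) = pvCh s.toList r := pvChar_eq s r (by omega)
      rw [hch]
      have hcast : ((r : Int) + 1) = ((r + 1 : Nat) : Int) := by push_cast; ring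
      by_cases ha : pvCh s.toList r = 'a'
      · rw [if_pos ha]
        have hpa : pvPa s.toList (r+1) = pvPa s.toList r + 1 := by simp [pvPa, ha]
        have hpb : pvPb s.toList (r+1) = pvPb s.toList r := by
          simp [pvPb, ha]
        have hpr : pvPairsF s.toList l (r+1) = pvPairsF s.toList l r := by
          rw [pvPairsF_succ_r]; simp [ha]
        have hrec := ih (r+1) (by omega) (by omega) (by omega) (by rw [hpr]; exact hQ)
        rw [hpr, hpa, hpb] at hrec
        rw [hcast, show pvPa s.toList r - pvPa s.toList l + 1
          = pvPa s.toList r + 1 - pvPa s.toList l from by ring]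
        exact hrec
      · rw [if_neg ha]
        by_cases hb : pvCh s.toList r = 'b'
        · rw [if_pos hb]
          have hpa : pvPa s.toList (r+1) = pvPa s.toList r := by simp [pvPa, hb]
          have hpb : pvPb s.toList (r+1) = pvPb s.toList r + 1 := by simp [pvPb, hb]
          have hpr : pvPairsF s.toList l (r+1)
              = pvPairsF s.toList l r + (pvPa s.toList r - pvPa s.toList l) := by
            rw [pvPairsF_succ_r]; simp [hb]
          by_cases hfeas : pvPairsF s.toList l r + (pvPa s.toList r - pvPa s.toList l) ≤ c
          · rw [if_pos (by omega)]
            have hrec := ih (r+1) (by omega) (by omega) (by omega) (by rw [hpr]; exact hfeas)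
            rw [hpr, hpa, hpb] at hrec
            rw [hcast, show pvPb s.toList r - pvPb s.toList l + 1
              = pvPb s.toList r + 1 - pvPb s.toList l from by ring]
            exact hrec
          · rw [if_neg (by omega)]
            have hR : pvR s.toList c N l = r := by
              have h1 := pvR_max s.toList hlr hrN hQ
              have h2 := pvR_le s.toList c N l
              by_contra hne
              have hlt : r + 1 ≤ pvR s.toList c N l := by omega
              have := pvPairsF_mono_r s.toList (show l ≤ r + 1 by omega) hlt
              have := pvR_pairs s.toList hc hl
              omega
            rw [hR]
        · rw [if_neg hb]
          have hpa : pvPa s.toList (r+1) = pvPa s.toList r := by simp [pvPa, ha]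
          have hpb : pvPb s.toList (r+1) = pvPb s.toList r := by simp [pvPb, hb]
          have hpr : pvPairsF s.toList l (r+1) = pvPairsF s.toList l r := by
            rw [pvPairsF_succ_r]; simp [hb]
          have hrec := ih (r+1) (by omega) (by omega) (by omega) (by rw [hpr]; exact hQ)
          rw [hpr, hpa, hpb] at hrec
          rw [hcast]
          exact hrec
    · rw [if_neg hrn]
      have hrN' : r = N := by omega
      have hR : pvR s.toList c N l = r := by
        have h1 := pvR_max s.toList hlr hrN hQ
        have h2 := pvR_le s.toList c N l
        omega
      rw [hR]

theorem pvAFor_spec (s : String) (c : Int) (N : Nat) (hlen : N ≤ s.toList.length)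
    (hc : 0 ≤ c) :
    ∀ (fuel l : Nat) (res : Int) (r : Nat), l + fuel = N → l ≤ r → r ≤ N →
      pvPairsF s.toList l r ≤ c →
      pvAFor s (N : Int) c fuel (pvPairsF s.toList l r)
        (pvPa s.toList r - pvPa s.toList l) (pvPb s.toList r - pvPb s.toList l)
        res (r : Int) (l : Int)
      = pvF s.toList c N fuel l res := by
  intro fuel
  induction fuel with
  | zero => intro l res r _ _ _ _; rw [pvAFor, pvF]
  | succ fuel ih =>
    intro l res r hlN hlr hrN hQ
    have hlN2 : l < N := by omega
    have hRge : l + 1 ≤ pvR s.toList c N l := pvR_ge_succ s.toList hc hlN2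
    have hRle : pvR s.toList c N l ≤ N := pvR_le s.toList c N l
    have hQR : pvPairsF s.toList l (pvR s.toList c N l) ≤ c :=
      pvR_pairs s.toList hc (by omega)
    rw [pvAFor, pvF]
    rw [pvAWhile_spec s c N hlen hc l (by omega) (((N : Int) - (r : Int)).toNat) r
      (by omega) hlr hrN hQ]
    rw [pvChar_eq s l (by omega)]
    have hcast : ((l : Int) + 1) = ((l + 1 : Nat) : Int) := by push_cast; ring
    by_cases ha : pvCh s.toList l = 'a'
    · rw [if_pos ha]
      have hpa : pvPa s.toList (l+1) = pvPa s.toList l + 1 := by simp [pvPa, ha]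
      have hpb : pvPb s.toList (l+1) = pvPb s.toList l := by simp [pvPb, ha]
      have hQ' : pvPairsF s.toList (l+1) (pvR s.toList c N l) ≤ c := by
        rw [pvPairsF_succ_l_a s.toList l _ ha]
        have := pvPb_mono s.toList (show l ≤ pvR s.toList c N l by omega)
        omega
      have hrec := ih (l+1) (max res ((pvR s.toList c N l : Int) - (l : Int)))
        (pvR s.toList c N l) (by omega) hRge hRle hQ'
      rw [pvPairsF_succ_l_a s.toList l _ ha, hpa, hpb] at hrec
      rw [hcast, show pvPa s.toList (pvR s.toList c N l) - pvPa s.toList l - 1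
        = pvPa s.toList (pvR s.toList c N l) - (pvPa s.toList l + 1) from by ring]
      exact hrec
    · rw [if_neg ha]
      by_cases hb : pvCh s.toList l = 'b'
      · rw [if_pos hb]
        have hpa : pvPa s.toList (l+1) = pvPa s.toList l := by simp [pvPa, hb]
        have hpb : pvPb s.toList (l+1) = pvPb s.toList l + 1 := by simp [pvPb, hb]
        have hQ' : pvPairsF s.toList (l+1) (pvR s.toList c N l) ≤ c := by
          rw [pvPairsF_succ_l_b s.toList l _ hb]; exact hQR
        have hrec := ih (l+1) (max res ((pvR s.toList c N l : Int) - (l : Int)))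
          (pvR s.toList c N l) (by omega) hRge hRle hQ'
        rw [pvPairsF_succ_l_b s.toList l _ hb, hpa, hpb] at hrec
        rw [hcast, show pvPb s.toList (pvR s.toList c N l) - pvPb s.toList l - 1
          = pvPb s.toList (pvR s.toList c N l) - (pvPb s.toList l + 1) from by ring]
        exact hrec
      · rw [if_neg hb]
        have hpa : pvPa s.toList (l+1) = pvPa s.toList l := by simp [pvPa, ha]
        have hpb : pvPb s.toList (l+1) = pvPb s.toList l := by simp [pvPb, hb]
        have hQ' : pvPairsF s.toList (l+1) (pvR s.toList c N l) ≤ c := by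
          rw [pvPairsF_succ_l_o s.toList l _ ha hb]; exact hQR
        have hrec := ih (l+1) (max res ((pvR s.toList c N l : Int) - (l : Int)))
          (pvR s.toList c N l) (by omega) hRge hRle hQ'
        rw [pvPairsF_succ_l_o s.toList l _ ha hb, hpa, hpb] at hrec
        rw [hcast]
        exact hrec

-- ===== B-side =====

def pvMapA (t : List Char) (i : Nat) : List Int := (List.range (i+1)).map (fun k => pvPa t k)
def pvMapB (t : List Char) (i : Nat) : List Int := (List.range (i+1)).map (fun k => pvPb t k)
def pvMapS (t : List Char) (i : Nat) : List Int := (List.range (i+1)).map (fun k => pvSb t k)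

theorem pvGetI_map (f : Nat → Int) (i k : Nat) (h : k ≤ i) :
    pvGetI ((List.range (i+1)).map f) (k : Int) = f k := by
  simp [pvGetI, PySem.List.pyGet?_natCast, List.getElem?_map, List.getElem?_range,
    Nat.lt_succ_of_le h]

theorem pvBuild_spec (s : String) (N : Nat) (hlen : N ≤ s.toList.length) :
    ∀ (fuel i : Nat), i + fuel = N →
      pvBuild s fuel (i : Int) (pvMapA s.toList i, pvMapB s.toList i, pvMapS s.toList i)
      = (pvMapA s.toList N, pvMapB s.toList N, pvMapS s.toList N) := by
  intro fuel
  induction fuel with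
  | zero =>
    intro i h
    obtain rfl : i = N := by omega
    rfl
  | succ fuel ih =>
    intro i h
    have hiN : i < N := by omega
    rw [pvBuild]
    have hch : pvCharB s (i : Int) = pvCh s.toList i := pvCharB_eq s i (by omega)
    simp only [pvMapA, pvMapB, pvMapS, hch,
      pvGetI_map (fun k => pvPa s.toList k) i i le_rfl,
      pvGetI_map (fun k => pvPb s.toList k) i i le_rfl,
      pvGetI_map (fun k => pvSb s.toList k) i i le_rfl]
    have hA : (List.range (i+1)).map (fun k => pvPa s.toList k)
        ++ [pvPa s.toList i + (if pvCh s.toList i = 'a' then 1 else 0)]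
        = (List.range (i+1+1)).map (fun k => pvPa s.toList k) := by
      rw [List.range_succ (n := i+1), List.map_append]
      simp [pvPa]
    have hB : (List.range (i+1)).map (fun k => pvPb s.toList k)
        ++ [pvPb s.toList i + (if pvCh s.toList i = 'b' then 1 else 0)]
        = (List.range (i+1+1)).map (fun k => pvPb s.toList k) := by
      rw [List.range_succ (n := i+1), List.map_append]
      simp [pvPb]
    have hS : (List.range (i+1)).map (fun k => pvSb s.toList k)
        ++ [pvSb s.toList i + (if pvCh s.toList i = 'b' then pvPa s.toList i else 0)]
        = (List.range (i+1+1)).map (fun k => pvSb s.toList k) := by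
      rw [List.range_succ (n := i+1), List.map_append]
      simp [pvSb]
    rw [hA, hB, hS]
    have hcast : ((i : Int) + 1) = ((i + 1 : Nat) : Int) := by push_cast; ring
    rw [hcast]
    have := ih (i+1) (by omega)
    simp only [pvMapA, pvMapB, pvMapS] at this
    exact this

theorem pvPairs_eq (t : List Char) (N l r : Nat) (hl : l ≤ N) (hr : r ≤ N) :
    pvPairs (pvMapA t N) (pvMapB t N) (pvMapS t N) (l : Int) (r : Int) = pvPairsF t l r := by
  simp only [pvPairs, pvPairsF, pvMapA, pvMapB, pvMapS,
    pvGetI_map (fun k => pvPa t k) N l hl, pvGetI_map (fun k => pvPb t k) N l hl,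
    pvGetI_map (fun k => pvSb t k) N l hl, pvGetI_map (fun k => pvPa t k) N r hr,
    pvGetI_map (fun k => pvPb t k) N r hr, pvGetI_map (fun k => pvSb t k) N r hr]

theorem pvBSearch_spec (t : List Char) (c : Int) (N l : Nat) (hc : 0 ≤ c) (hl : l ≤ N) :
    ∀ (fuel lo hi : Nat), hi - lo ≤ fuel → l ≤ lo → lo ≤ pvR t c N l → pvR t c N l ≤ hi →
      hi ≤ N →
      pvBSearch (pvMapA t N) (pvMapB t N) (pvMapS t N) c (l : Int) fuel (lo : Int) (hi : Int)
      = ((pvR t c N l : Nat) : Int) := by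
  intro fuel
  induction fuel with
  | zero =>
    intro lo hi hf h1 h2 h3 h4
    have : lo = pvR t c N l := by omega
    rw [pvBSearch, this]
  | succ fuel ih =>
    intro lo hi hf h1 h2 h3 h4
    rw [pvBSearch]
    by_cases hlh : (lo : Int) < (hi : Int)
    · rw [if_pos hlh]
      have hlh2 : lo < hi := by exact_mod_cast hlh
      have hmid : PySem.Int.floordiv ((lo : Int) + (hi : Int) + 1) 2
          = (((lo + hi + 1) / 2 : Nat) : Int) := by
        have : ((lo : Int) + (hi : Int) + 1) = (((lo + hi + 1 : Nat) : Nat) : Int) := by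
          push_cast; ring
        rw [this]
        exact_mod_cast PySem.Int.floordiv_natCast (lo + hi + 1) 2
      set m : Nat := (lo + hi + 1) / 2 with hmdef
      have hm1 : lo < m := by omega
      have hm2 : m ≤ hi := by omega
      rw [hmid]
      dsimp only
      rw [pvPairs_eq t N l m (by omega) (by omega)]
      have hiff := pvQ_iff t hc hl (show l ≤ m by omega) (show m ≤ N by omega)
      by_cases hcond : pvPairsF t l m ≤ c
      · rw [if_pos hcond]
        exact ih m hi (by omega) (by omega) (hiff.mp hcond) h3 h4
      · rw [if_neg hcond]
        have hRm : pvR t c N l ≤ m - 1 := by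
          have := fun h => hcond (hiff.mpr h)
          omega
        have hcast : ((m : Int) - 1) = ((m - 1 : Nat) : Int) := by omega
        rw [hcast]
        exact ih lo (m-1) (by omega) h1 h2 hRm (by omega)
    · rw [if_neg hlh]
      have : lo = pvR t c N l := by
        have : hi ≤ lo := by exact_mod_cast not_lt.mp hlh
        omega
      rw [this]

theorem pvBFor_spec (t : List Char) (c : Int) (N : Nat) (hc : 0 ≤ c) :
    ∀ (fuel l : Nat) (res : Int), l + fuel = N →
      pvBFor (pvMapA t N) (pvMapB t N) (pvMapS t N) (N : Int) c fuel (l : Int) res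
      = pvF t c N fuel l res := by
  intro fuel
  induction fuel with
  | zero => intro l res h; rw [pvBFor, pvF]
  | succ fuel ih =>
    intro l res h
    have hlN : l < N := by omega
    rw [pvBFor, pvF]
    have hsearch := pvBSearch_spec t c N l hc (by omega)
      (((N : Int) - (l : Int)).toNat) l N (by omega) le_rfl
      (pvR_ge t hc (by omega)) (pvR_le t c N l) le_rfl
    rw [hsearch]
    have hcast : ((l : Int) + 1) = ((l + 1 : Nat) : Int) := by push_cast; ring
    rw [hcast]
    exact ih (l+1) _ (by omega)

-- ===== assembling =====

theorem portA_eq (s : String) (c n : Int) (hn : 0 ≤ n) (hlen : n ≤ (s.toList.length : Int))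
    (hc : 0 ≤ c) : task_6_2_g n c s = pvF s.toList c n.toNat n.toNat 0 0 := by
  unfold task_6_2_g
  have hN : n = ((n.toNat : Nat) : Int) := by omega
  have hlen2 : n.toNat ≤ s.toList.length := by omega
  have := pvAFor_spec s c n.toNat hlen2 hc n.toNat 0 0 0 (by omega) le_rfl (by omega)
    (by rw [pvPairsF_self]; exact hc)
  simp only [pvPairsF_self, sub_self, Nat.cast_zero] at this
  rw [hN]
  exact this

theorem portB_eq (s : String) (c n : Int) (hn : 0 ≤ n) (hlen : n ≤ (s.toList.length : Int))
    (hc : 0 ≤ c) : task_6_2_g_alt n c s = pvF s.toList c n.toNat n.toNat 0 0 := by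
  unfold task_6_2_g_alt
  have hN : n = ((n.toNat : Nat) : Int) := by omega
  have hlen2 : n.toNat ≤ s.toList.length := by omega
  have hinit : (([0], [0], [0]) : List Int × List Int × List Int)
      = (pvMapA s.toList 0, pvMapB s.toList 0, pvMapS s.toList 0) := by
    simp [pvMapA, pvMapB, pvMapS, List.range_succ, pvPa, pvPb, pvSb]
  have hbuild := pvBuild_spec s n.toNat hlen2 n.toNat 0 (by omega)
  norm_num at hbuild
  rw [hN]
  simp only [Int.toNat_natCast]
  rw [hinit, hbuild]
  have := pvBFor_spec s.toList c n.toNat hc n.toNat 0 0 (by omega)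
  simpa using this

-- the c < 0 cases on which A and B still agree (both return 0)

theorem pvPairsF_nonneg (t : List Char) {l r : Nat} (h : l ≤ r) : 0 ≤ pvPairsF t l r := by
  have := pvPairsF_mono_r t (le_refl l) h
  rw [pvPairsF_self] at this
  exact this

theorem pvBSearch_neg (t : List Char) {c : Int} (hc : c < 0) (N l : Nat) (hl : l ≤ N) :
    ∀ (fuel lo hi : Nat), l ≤ lo → hi ≤ N →
      pvBSearch (pvMapA t N) (pvMapB t N) (pvMapS t N) c (l : Int) fuel (lo : Int) (hi : Int)
      = (lo : Int) := by
  intro fuel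
  induction fuel with
  | zero => intro lo hi _ _; rw [pvBSearch]
  | succ fuel ih =>
    intro lo hi h1 h2
    rw [pvBSearch]
    by_cases hlh : (lo : Int) < (hi : Int)
    · rw [if_pos hlh]
      have hlh2 : lo < hi := by exact_mod_cast hlh
      have hmid : PySem.Int.floordiv ((lo : Int) + (hi : Int) + 1) 2
          = (((lo + hi + 1) / 2 : Nat) : Int) := by
        have : ((lo : Int) + (hi : Int) + 1) = (((lo + hi + 1 : Nat) : Nat) : Int) := by
          push_cast; ring
        rw [this]
        exact_mod_cast PySem.Int.floordiv_natCast (lo + hi + 1) 2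
      set m : Nat := (lo + hi + 1) / 2 with hmdef
      have hm1 : lo < m := by omega
      have hm2 : m ≤ hi := by omega
      rw [hmid]
      dsimp only
      rw [pvPairs_eq t N l m (by omega) (by omega)]
      rw [if_neg (by have := pvPairsF_nonneg t (show l ≤ m by omega); omega)]
      have hcast : ((m : Int) - 1) = ((m - 1 : Nat) : Int) := by omega
      rw [hcast]
      exact ih lo (m-1) h1 (by omega)
    · rw [if_neg hlh]

theorem pvBFor_neg (t : List Char) {c : Int} (hc : c < 0) (N : Nat) :
    ∀ (fuel l : Nat), l + fuel = N →
      pvBFor (pvMapA t N) (pvMapB t N) (pvMapS t N) (N : Int) c fuel (l : Int) 0 = 0 := by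
  intro fuel
  induction fuel with
  | zero => intro l h; rw [pvBFor]
  | succ fuel ih =>
    intro l h
    rw [pvBFor]
    rw [pvBSearch_neg t hc N l (by omega) (((N : Int) - (l : Int)).toNat) l N le_rfl le_rfl]
    have hcast : ((l : Int) + 1) = ((l + 1 : Nat) : Int) := by push_cast; ring
    rw [hcast]
    have hres : max (0 : Int) ((l : Int) - (l : Int)) = 0 := by omega
    rw [hres]
    exact ih (l+1) (by omega)

theorem portB_neg (s : String) (c n : Int) (hn : 0 ≤ n) (hlen : n ≤ (s.toList.length : Int))
    (hc : c < 0) : task_6_2_g_alt n c s = 0 := by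
  unfold task_6_2_g_alt
  have hN : n = ((n.toNat : Nat) : Int) := by omega
  have hlen2 : n.toNat ≤ s.toList.length := by omega
  have hinit : (([0], [0], [0]) : List Int × List Int × List Int)
      = (pvMapA s.toList 0, pvMapB s.toList 0, pvMapS s.toList 0) := by
    simp [pvMapA, pvMapB, pvMapS, List.range_succ, pvPa, pvPb, pvSb]
  have hbuild := pvBuild_spec s n.toNat hlen2 n.toNat 0 (by omega)
  norm_num at hbuild
  rw [hN]
  simp only [Int.toNat_natCast]
  rw [hinit, hbuild]
  exact pvBFor_neg s.toList hc n.toNat n.toNat 0 (by omega)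

theorem pvAWhile_stuck (s : String) (n c : Int) (hn : 0 < n) (hb : pvChar s 0 = 'b')
    {mark a : Int} (hma : ¬ (mark + a ≤ c)) (b : Int) :
    ∀ fuel, pvAWhile s n c fuel mark a b 0 = (mark, a, b, 0) := by
  intro fuel
  cases fuel with
  | zero => rw [pvAWhile]
  | succ fuel =>
    rw [pvAWhile, if_pos hn, hb]
    norm_num
    rw [if_neg (show ¬ ('b' : Char) = 'a' from by decide), if_neg hma]

theorem pvAFor_stuck (s : String) (n c : Int) (hn : 0 < n) (hb : pvChar s 0 = 'b')
    (hc : c < 0) :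
    ∀ (fuel : Nat) (mark a b res l : Int), 1 ≤ l → 0 ≤ res → b ≤ -1 → 0 ≤ mark + a →
      pvAFor s n c fuel mark a b res 0 l = res := by
  intro fuel
  induction fuel with
  | zero => intro mark a b res l _ _ _ _; rw [pvAFor]
  | succ fuel ih =>
    intro mark a b res l hl hres hb1 hma
    rw [pvAFor]
    rw [pvAWhile_stuck s n c hn hb (by omega) b ((n - 0).toNat)]
    have hres' : max res ((0 : Int) - l) = res := by omega
    dsimp only
    rw [hres']
    by_cases ha' : pvChar s l = 'a'
    · rw [if_pos ha']
      exact ih (mark - b) (a - 1) b res (l+1) (by omega) hres hb1 (by omega)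
    · rw [if_neg ha']
      by_cases hb' : pvChar s l = 'b'
      · rw [if_pos hb']
        exact ih mark a (b - 1) res (l+1) (by omega) hres (by omega) hma
      · rw [if_neg hb']
        exact ih mark a b res (l+1) (by omega) hres hb1 hma

theorem portA_headb (s : String) (c n : Int) (hn : 1 ≤ n) (hc : c < 0)
    (hb : pvChar s 0 = 'b') : task_6_2_g n c s = 0 := by
  unfold task_6_2_g
  have hfuel : n.toNat = (n.toNat - 1) + 1 := by omega
  rw [hfuel, pvAFor]
  rw [pvAWhile_stuck s n c (by omega) hb (by omega) 0 ((n - 0).toNat)]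
  dsimp only
  rw [hb]
  norm_num
  rw [if_neg (show ¬ ('b' : Char) = 'a' from by decide)]
  exact pvAFor_stuck s n c (by omega) hb hc (n.toNat - 1) 0 0 (-1) 0 1
    (by omega) le_rfl (by omega) (by omega)

-- inside D_ the two programs differ everywhere: A ≥ 1 while B = 0

theorem pvAWhile_r_mono (s : String) (n c : Int) :
    ∀ (fuel : Nat) (mark a b r : Int), r ≤ (pvAWhile s n c fuel mark a b r).2.2.2 := by
  intro fuel
  induction fuel with
  | zero => intro mark a b r; rw [pvAWhile]
  | succ fuel ih =>
    intro mark a b r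
    rw [pvAWhile]
    by_cases h1 : r < n
    · rw [if_pos h1]
      by_cases h2 : pvChar s r = 'a'
      · rw [if_pos h2]; have := ih mark (a+1) b (r+1); omega
      · rw [if_neg h2]
        by_cases h3 : pvChar s r = 'b'
        · rw [if_pos h3]
          by_cases h4 : mark + a ≤ c
          · rw [if_pos h4]; have := ih (mark+a) a (b+1) (r+1); omega
          · rw [if_neg h4]
        · rw [if_neg h3]; have := ih mark a b (r+1); omega
    · rw [if_neg h1]

theorem pvAWhile_r_one (s : String) (n c : Int) (hn : 0 < n) (hb : pvChar s 0 ≠ 'b') :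
    ∀ (fuel : Nat) (mark a b : Int), 1 ≤ fuel →
      1 ≤ (pvAWhile s n c fuel mark a b 0).2.2.2 := by
  intro fuel mark a b hfuel
  obtain ⟨fuel', rfl⟩ : ∃ k, fuel = k + 1 := ⟨fuel - 1, by omega⟩
  rw [pvAWhile, if_pos hn]
  by_cases h2 : pvChar s 0 = 'a'
  · rw [if_pos h2]
    have := pvAWhile_r_mono s n c fuel' mark (a+1) b (0+1)
    omega
  · rw [if_neg h2, if_neg hb]
    have := pvAWhile_r_mono s n c fuel' mark a b (0+1)
    omega

theorem pvAFor_res_mono (s : String) (n c : Int) :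
    ∀ (fuel : Nat) (mark a b res r l : Int), res ≤ pvAFor s n c fuel mark a b res r l := by
  intro fuel
  induction fuel with
  | zero => intro mark a b res r l; rw [pvAFor]
  | succ fuel ih =>
    intro mark a b res r l
    rw [pvAFor]
    split_ifs with h1 h2
    · exact le_trans (le_max_left _ _) (ih _ _ _ _ _ _)
    · exact le_trans (le_max_left _ _) (ih _ _ _ _ _ _)
    · exact le_trans (le_max_left _ _) (ih _ _ _ _ _ _)

theorem portA_pos (s : String) (c n : Int) (hn : 1 ≤ n) (hb : pvChar s 0 ≠ 'b') :
    1 ≤ task_6_2_g n c s := by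
  unfold task_6_2_g
  have hfuel : n.toNat = (n.toNat - 1) + 1 := by omega
  rw [hfuel, pvAFor]
  have hr1 : 1 ≤ (pvAWhile s n c ((n - 0).toNat) 0 0 0 0).2.2.2 :=
    pvAWhile_r_one s n c (by omega) hb ((n - 0).toNat) 0 0 0 (by omega)
  have hres : (1 : Int) ≤ max 0 ((pvAWhile s n c ((n - 0).toNat) 0 0 0 0).2.2.2 - 0) := by
    omega
  split_ifs with h1 h2
  all_goals exact le_trans hres (pvAFor_res_mono s n c _ _ _ _ _ _ _)

-- ===== VERDICT (by name: the statement is the Claim_ definition above) =====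
theorem task_6_2_g_spec : Claim_unchanged_task_6_2_g := by
  unfold Claim_unchanged_task_6_2_g
  intro n c s _hdom hpre
  unfold Spec_task_6_2_g
  intro hD
  unfold D_task_6_2_g at hD
  push_neg at hD
  by_cases hc : 0 ≤ c
  · by_cases hn : 0 ≤ n
    · rw [portA_eq s c n hn hpre hc, portB_eq s c n hn hpre hc]
    · have h0 : n.toNat = 0 := by omega
      unfold task_6_2_g task_6_2_g_alt
      rw [h0]
      rfl
  · have hc' : c < 0 := by omega
    by_cases hn : 1 ≤ n
    · have hhb : s.toList.head? = some 'b' := hD hc' hn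
      have hb : pvChar s 0 = 'b' := by
        have h00 : (0 : Int) = ((0 : Nat) : Int) := rfl
        rw [pvChar, h00, PySem.Str.pyGet?_natCast]
        rw [← List.head?_eq_getElem?, hhb]
        rfl
      rw [portA_headb s c n hn hc' hb, portB_neg s c n (by omega) hpre hc']
    · have h0 : n.toNat = 0 := by omega
      unfold task_6_2_g task_6_2_g_alt
      rw [h0]
      rfl

theorem task_6_2_g_changed : Claim_changed_task_6_2_g := by
  unfold Claim_changed_task_6_2_g; decide

theorem task_6_2_g_tight : Claim_exact_task_6_2_g := by
  unfold Claim_exact_task_6_2_g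
  intro n c s _hdom hpre hD
  unfold D_task_6_2_g at hD
  obtain ⟨hc, hn, hhb⟩ := hD
  have hb : pvChar s 0 ≠ 'b' := by
    have hlen : 1 ≤ s.toList.length := by
      unfold Pre_task_6_2_g at hpre
      omega
    cases hts : s.toList with
    | nil => rw [hts] at hlen; simp at hlen
    | cons h0 t0 =>
      have h00 : (0 : Int) = ((0 : Nat) : Int) := rfl
      rw [pvChar, h00, PySem.Str.pyGet?_natCast, hts]
      intro hcontra
      apply hhb
      rw [hts]
      simpa using hcontra
  rw [portB_neg s c n (by omega) hpre hc]
  have := portA_pos s c n hn hb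
  omega
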